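-- pv_equiv track=rewrite | github.com/Andttrea/bipython | src/VillarruelGarcía_Andrea_Ejercico5.py | orfs
-- ===== SOURCE A (Python) =====
-- def orfs(rna_secuencia, codones_paro):
--     """
--     Encuentra todos los marcos de lectura abiertos (ORFs) en una secuencia de RNA.
--
--     Parámetros:
--     -----------
--     rna_secuencia : Bio.Seq.Seq
--         Secuencia de RNA en la que buscar los ORFs
--     codones_paro : list
--         Lista de codones de parada (stop codons)
--
--     Retorna:
--     --------
--     list
--         Lista de strings con todos los ORFs encontrados en los 3 marcos de lectura
--     """
--     orfs =  []
--     rna = str(rna_secuencia)  # convertimos el objeto Seq a string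
--     longitud = len(rna)
--
--     for frame in range(3):
--         posiciones_inicio = []
--         for indice in range(frame, longitud - 2, 3):
--             if rna[indice:indice + 3] == "AUG":
--                 posiciones_inicio.append(indice)
--
--         for inicio in posiciones_inicio:
--             codones = []
--             for indice in range(inicio, longitud - 2, 3):
--                 codon_actual = rna[indice:indice + 3]
--                 codones.append(codon_actual)
--                 if codon_actual in codones_paro and indice != inicio:
--                     orfs.append("".join(codones))
--                     break
--             else:
--                 orfs.append("".join(codones))
--
--     return orfs
-- ===== SOURCE B (Python) =====
-- def orfs(rna_secuencia, codones_paro):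
--     rna = str(rna_secuencia)
--     longitud = len(rna)
--     paro = set(codones_paro)
--     resultado = []
--     for frame in range(3):
--         # one pass: indices of all in-frame stop codons, in increasing order
--         paradas = [i for i in range(frame, longitud - 2, 3)
--                    if rna[i:i + 3] in paro]
--         p = 0  # pointer into paradas; only moves forward as starts increase
--         for inicio in range(frame, longitud - 2, 3):
--             if rna[inicio:inicio + 3] == "AUG":
--                 while p < len(paradas) and paradas[p] <= inicio:
--                     p += 1
--                 if p < len(paradas):
--                     resultado.append(rna[inicio:paradas[p] + 3])
--                 else:
--                     resultado.append(rna[inicio:inicio + 3 * ((longitud - inicio) // 3)])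
--     return resultado
-- ===== Notes on version B (the rewrite author's own statement) =====
-- stated objective: alternative
-- what changed: Instead of re-scanning codons from every AUG start until a stop and joining them, B makes one pass per frame collecting the in-frame stop indices and then pairs each AUG start with its first later stop via a monotone forward pointer, emitting each ORF as a single slice; it trades A's per-start rescans for an extra per-frame pass.
import Mathlib
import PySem

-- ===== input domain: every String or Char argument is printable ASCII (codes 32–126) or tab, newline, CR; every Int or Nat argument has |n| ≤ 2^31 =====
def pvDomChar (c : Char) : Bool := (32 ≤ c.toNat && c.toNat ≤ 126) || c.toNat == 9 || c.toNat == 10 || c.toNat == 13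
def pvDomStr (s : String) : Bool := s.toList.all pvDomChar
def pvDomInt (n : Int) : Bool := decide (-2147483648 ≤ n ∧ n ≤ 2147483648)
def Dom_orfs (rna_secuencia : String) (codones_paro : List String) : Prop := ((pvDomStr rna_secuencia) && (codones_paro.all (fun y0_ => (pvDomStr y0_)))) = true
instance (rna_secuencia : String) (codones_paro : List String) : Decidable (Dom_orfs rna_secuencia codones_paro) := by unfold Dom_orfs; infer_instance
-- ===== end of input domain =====

-- B replaces A's per-start rescan-until-stop-then-join with one per-frame pass collecting the
-- in-frame stop indices, then a forward pointer pairing each AUG start with its first later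
-- stop, emitting each ORF as a single slice (objective: alternative decomposition, same cost).

-- ===== PORT A =====
-- inner 'for indice in range(inicio, longitud-2, 3): … break / else' loop of A
def pvScanA (rna : List Char) (stops : List (List Char)) (inicio : Int) : List Int → List (List Char)
  | [] => []
  | i :: rest =>
    let codon := PySem.List.slice rna (some i) (some (i + 3))
    if stops.contains codon && i != inicio then [codon]
    else codon :: pvScanA rna stops inicio rest

def orfs (rna_secuencia : String) (codones_paro : List String) : List String :=
  -- str(rna_secuencia) is the identity on str; strings are handled as their char lists,
  -- stop-codon membership compares char lists (String.toList is injective, so exact)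
  let rna := rna_secuencia.toList
  let stops := codones_paro.map String.toList
  let longitud : Int := PySem.Chars.len rna
  (PySem.List.pyRange 0 3 1).foldl (fun acc frame =>
    let posiciones := (PySem.List.pyRange frame (longitud - 2) 3).foldl
      (fun ps i => if PySem.List.slice rna (some i) (some (i + 3)) == ['A','U','G'] then ps ++ [i] else ps) []
    posiciones.foldl (fun acc2 inicio =>
      acc2 ++ [String.ofList (PySem.Chars.join []
        (pvScanA rna stops inicio (PySem.List.pyRange inicio (longitud - 2) 3)))]) acc) []

-- ===== PORT B =====
-- 'while p < len(paradas) and paradas[p] <= inicio: p += 1' — the pointer is the list suffix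
def pvAdv (inicio : Int) : List Int → List Int
  | [] => []
  | s :: rest => if s ≤ inicio then pvAdv inicio rest else s :: rest

-- 'for inicio in range(frame, longitud-2, 3): if AUG: …' loop of B, carrying the pointer
def pvLoopB (rna : List Char) (longitud : Int) : List Int → List Int → List String
  | _, [] => []
  | paradas, inicio :: rest =>
    if PySem.List.slice rna (some inicio) (some (inicio + 3)) == ['A','U','G'] then
      let paradas' := pvAdv inicio paradas
      let item := match paradas' with
        | s :: _ => String.ofList (PySem.List.slice rna (some inicio) (some (s + 3)))
        | [] => String.ofList (PySem.List.slice rna (some inicio)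
                  (some (inicio + 3 * PySem.Int.floordiv (longitud - inicio) 3)))
      item :: pvLoopB rna longitud paradas' rest
    else pvLoopB rna longitud paradas rest

def orfs_alt (rna_secuencia : String) (codones_paro : List String) : List String :=
  let rna := rna_secuencia.toList
  let paro : PySem.Set (List Char) := PySem.Set.ofList (codones_paro.map String.toList)
  let longitud : Int := PySem.Chars.len rna
  (PySem.List.pyRange 0 3 1).foldl (fun acc frame =>
    let paradas := (PySem.List.pyRange frame (longitud - 2) 3).filter
      (fun i => PySem.Set.contains paro (PySem.List.slice rna (some i) (some (i + 3))))
    acc ++ pvLoopB rna longitud paradas (PySem.List.pyRange frame (longitud - 2) 3)) []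

-- ===== PRECONDITION & SPEC =====
def Spec_orfs (rna_secuencia : String) (codones_paro : List String) (out : List String) : Prop := out = orfs_alt rna_secuencia codones_paro
instance (rna_secuencia : String) (codones_paro : List String) (out : List String) : Decidable (Spec_orfs rna_secuencia codones_paro out) := by unfold Spec_orfs; infer_instance

-- ===== CLAIM (what is proved, stated in full; the proofs are below) =====
def Claim_equal_orfs : Prop := ∀ (rna_secuencia : String) (codones_paro : List String), Dom_orfs rna_secuencia codones_paro → Spec_orfs rna_secuencia codones_paro (orfs rna_secuencia codones_paro)

-- ===== LEMMAS AND PROOFS =====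

theorem pvRange3_nil (a b : Int) (h : b ≤ a) : PySem.List.pyRange a b 3 = [] := by
  rw [PySem.List.pyRange_of_pos a b (by norm_num)]
  simp [if_neg (by omega : ¬ a < b)]

theorem pvMem_range3 {a b x : Int} (hx : x ∈ PySem.List.pyRange a b 3) : a ≤ x ∧ x < b ∧ (3 : Int) ∣ x - a := by
  exact (PySem.List.mem_pyRange_iff_of_pos (by norm_num) x).1 hx

theorem pvAdv_of_forall_lt (a : Int) (l : List Int) (h : ∀ x ∈ l, a < x) : pvAdv a l = l := by
  cases l with
  | nil => rfl
  | cons s rest =>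
    have hs : ¬ s ≤ a := by have := h s (by simp); omega
    simp [pvAdv, hs]

theorem pvAdv_pvAdv (a b : Int) (hab : a ≤ b) (l : List Int) : pvAdv b (pvAdv a l) = pvAdv b l := by
  induction l with
  | nil => rfl
  | cons s rest ih =>
    by_cases hs : s ≤ a
    · simp [pvAdv, hs, (by omega : s ≤ b), ih]
    · simp [pvAdv, hs]

theorem pvStop_eq (stops : List (List Char)) (c : List Char) :
    PySem.Set.contains (PySem.Set.ofList stops) c = stops.contains c := by
  by_cases h : c ∈ stops
  · simp [PySem.Set.contains_eq_listContains, h, PySem.Set.mem_ofList]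
  · simp [PySem.Set.contains_eq_listContains, h, PySem.Set.mem_ofList]

theorem pvRange3_cons (a b : Int) (h : a < b) : PySem.List.pyRange a b 3 = a :: PySem.List.pyRange (a + 3) b 3 := by
  rw [PySem.List.pyRange_of_pos a b (by norm_num), PySem.List.pyRange_of_pos (a+3) b (by norm_num)]
  rw [if_pos h]
  have hn : ((b - a + 3 - 1) / 3).toNat = (if a + 3 < b then ((b - (a+3) + 3 - 1) / 3).toNat else 0) + 1 := by
    split_ifs with h2 <;> omega
  rw [hn, List.range_succ_eq_map]
  simp [List.map_map, Function.comp]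
  intro k _
  ring

theorem pvJoin_nil_eq_flatten (l : List (List Char)) : PySem.Chars.join [] l = l.flatten := by
  induction l with
  | nil => simp [PySem.Chars.join, List.intercalate]
  | cons x xs ih => cases xs with
    | nil => simp [PySem.Chars.join, List.intercalate]
    | cons y ys => rw [PySem.Chars.join_cons_cons]; simp_all

theorem pvSlice_empty (xs : List Char) (a e : Int) (h0 : 0 ≤ e) (h : e ≤ a) :
    PySem.List.slice xs (some a) (some e) = [] := by
  rw [PySem.List.slice_toNat xs (by omega) h0]
  have : e.toNat - a.toNat = 0 := by omega
  simp [this]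

theorem pvSlice_concat (xs : List Char) (a m e : Int) (h0 : 0 ≤ a) (h1 : a ≤ m) (h2 : m ≤ e) :
    PySem.List.slice xs (some a) (some m) ++ PySem.List.slice xs (some m) (some e)
      = PySem.List.slice xs (some a) (some e) := by
  rw [PySem.List.slice_toNat xs h0 (by omega), PySem.List.slice_toNat xs (by omega : (0:Int) ≤ m) (by omega),
      PySem.List.slice_toNat xs h0 (by omega)]
  have h3 : e.toNat - a.toNat = (m.toNat - a.toNat) + (e.toNat - m.toNat) := by omega
  rw [h3, List.take_add]
  congr 1
  rw [List.drop_drop]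
  have h4 : a.toNat + (m.toNat - a.toNat) = m.toNat := by omega
  rw [h4]

theorem pvAdv_filter (p : Int → Bool) (b : Int) :
    ∀ (n : ℕ) (a inicio : Int), (b - a).toNat ≤ n → a ≤ inicio → (3 : Int) ∣ inicio - a →
    pvAdv inicio ((PySem.List.pyRange a b 3).filter p)
      = (PySem.List.pyRange (inicio + 3) b 3).filter p := by
  intro n
  induction n with
  | zero =>
    intro a inicio hn ha hdvd
    rw [pvRange3_nil a b (by omega), pvRange3_nil (inicio+3) b (by omega)]
    rfl
  | succ n ih =>
    intro a inicio hn ha hdvd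
    by_cases hab : b ≤ a
    · rw [pvRange3_nil a b hab, pvRange3_nil (inicio+3) b (by omega)]; rfl
    · rw [pvRange3_cons a b (by omega)]
      have step : pvAdv inicio (List.filter p (a :: PySem.List.pyRange (a+3) b 3))
          = pvAdv inicio (List.filter p (PySem.List.pyRange (a+3) b 3)) := by
        by_cases hp : p a
        · simp [hp, pvAdv, if_pos ha]
        · simp [hp]
      rw [step]
      by_cases hi : a + 3 ≤ inicio
      · exact ih (a+3) inicio (by omega) hi (by omega)
      · have : inicio = a := by omega
        subst this
        apply pvAdv_of_forall_lt
        intro x hx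
        have := pvMem_range3 (List.mem_of_mem_filter hx)
        omega

theorem pvScan_eq (rna : List Char) (stops : List (List Char)) (L : Int) :
    ∀ (n : ℕ) (a inicio : Int), (L - 2 - a).toNat ≤ n → inicio < a → 0 ≤ a → a ≤ L →
    (pvScanA rna stops inicio (PySem.List.pyRange a (L - 2) 3)).flatten
      = (match ((PySem.List.pyRange a (L - 2) 3).filter
            (fun i => stops.contains (PySem.List.slice rna (some i) (some (i + 3))))) with
         | s :: _ => PySem.List.slice rna (some a) (some (s + 3))
         | [] => PySem.List.slice rna (some a) (some (a + 3 * PySem.Int.floordiv (L - a) 3))) := by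
  intro n
  induction n with
  | zero =>
    intro a inicio hn hia h0 hL
    rw [pvRange3_nil a (L-2) (by omega)]
    simp only [pvScanA, List.filter_nil, List.flatten_nil]
    rw [PySem.Int.floordiv_eq_ediv_of_pos (by norm_num)]
    have hz : (L - a) / 3 = 0 := by omega
    rw [hz]
    simp [pvSlice_empty rna a a h0 le_rfl]
  | succ n ih =>
    intro a inicio hn hia h0 hL
    by_cases hab : L - 2 ≤ a
    · rw [pvRange3_nil a (L-2) hab]
      simp only [pvScanA, List.filter_nil, List.flatten_nil]
      rw [PySem.Int.floordiv_eq_ediv_of_pos (by norm_num)]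
      have hz : (L - a) / 3 = 0 := by omega
      rw [hz]
      simp [pvSlice_empty rna a a h0 le_rfl]
    · rw [pvRange3_cons a (L-2) (by omega)]
      have hne : (a != inicio) = true := by simp; omega
      by_cases hp : stops.contains (PySem.List.slice rna (some a) (some (a + 3)))
      · simp only [pvScanA, hp, hne, List.filter_cons]
        simp
      · simp only [pvScanA, hp, hne, List.filter_cons]
        simp only [Bool.false_and, Bool.false_eq_true, if_false, List.flatten_cons]
        rw [ih (a+3) inicio (by omega) (by omega) (by omega) ?hle]
        case hle =>
          by_cases h3 : a + 3 ≤ L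
          · exact h3
          · omega
        cases hf : List.filter (fun i => stops.contains (PySem.List.slice rna (some i) (some (i + 3))))
            (PySem.List.pyRange (a+3) (L-2) 3) with
        | cons s tl =>
          have hs : s ∈ PySem.List.pyRange (a+3) (L-2) 3 := by
            have : s ∈ List.filter (fun i => stops.contains (PySem.List.slice rna (some i) (some (i + 3))))
              (PySem.List.pyRange (a+3) (L-2) 3) := by rw [hf]; simp
            exact List.mem_of_mem_filter this
          have := pvMem_range3 hs
          exact pvSlice_concat rna a (a+3) (s+3) h0 (by omega) (by omega)
        | nil =>
          rw [PySem.Int.floordiv_eq_ediv_of_pos (by norm_num), PySem.Int.floordiv_eq_ediv_of_pos (by norm_num)]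
          have harith : (a + 3) + 3 * ((L - (a+3)) / 3) = a + 3 * ((L - a) / 3) := by omega
          rw [harith]
          have hge : 0 ≤ (L - a) / 3 := by omega
          exact pvSlice_concat rna a (a+3) (a + 3 * ((L - a) / 3)) h0 (by omega) (by omega)

theorem pvLoopB_eq (rna : List Char) (L : Int) (p0 : List Int) :
    ∀ (starts : List Int) (a : Int), (∀ s ∈ starts, a ≤ s) → starts.Pairwise (· ≤ ·) →
    pvLoopB rna L (pvAdv a p0) starts
      = (starts.filter (fun i => PySem.List.slice rna (some i) (some (i + 3)) == ['A','U','G'])).map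
          (fun inicio =>
            match pvAdv inicio p0 with
            | s :: _ => String.ofList (PySem.List.slice rna (some inicio) (some (s + 3)))
            | [] => String.ofList (PySem.List.slice rna (some inicio)
                      (some (inicio + 3 * PySem.Int.floordiv (L - inicio) 3)))) := by
  intro starts
  induction starts with
  | nil => intro a _ _; rfl
  | cons inicio rest ih =>
    intro a hb hpw
    have ha : a ≤ inicio := hb inicio (by simp)
    have hrest : ∀ s ∈ rest, inicio ≤ s := fun s hs => (List.pairwise_cons.1 hpw).1 s hs
    by_cases hAUG : (PySem.List.slice rna (some inicio) (some (inicio + 3)) == ['A','U','G']) = true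
    · simp only [pvLoopB, hAUG, if_pos, List.filter_cons, List.map_cons]
      rw [pvAdv_pvAdv a inicio ha p0]
      rw [ih inicio hrest (List.pairwise_cons.1 hpw).2]
    · simp only [pvLoopB, hAUG, List.filter_cons]
      simp only [Bool.false_eq_true, if_false]
      exact ih a (fun s hs => hb s (by simp [hs])) (List.pairwise_cons.1 hpw).2

theorem pvPairwise_range3 (a b : Int) : (PySem.List.pyRange a b 3).Pairwise (· ≤ ·) := by
  rw [PySem.List.pyRange_of_pos a b (by norm_num)]
  apply List.Pairwise.map
  · intro x y h
    exact h
  · apply List.Pairwise.imp (fun {x y} (h : x < y) => by omega : ∀ {x y : ℕ}, x < y → (fun (x y : ℕ) => a + 3 * (x:Int) ≤ a + 3 * (y:Int)) x y) (List.pairwise_lt_range)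

-- per-frame equality

theorem pvFrame_eq (rna : List Char) (stops : List (List Char)) (f : Int) (hf : 0 ≤ f) :
    (((PySem.List.pyRange f (PySem.Chars.len rna - 2) 3).filter
        (fun i => PySem.List.slice rna (some i) (some (i + 3)) == ['A','U','G'])).map
      (fun inicio => String.ofList (PySem.Chars.join []
        (pvScanA rna stops inicio (PySem.List.pyRange inicio (PySem.Chars.len rna - 2) 3)))))
    = pvLoopB rna (PySem.Chars.len rna)
        ((PySem.List.pyRange f (PySem.Chars.len rna - 2) 3).filter
          (fun i => PySem.Set.contains (PySem.Set.ofList stops) (PySem.List.slice rna (some i) (some (i + 3)))))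
        (PySem.List.pyRange f (PySem.Chars.len rna - 2) 3) := by
  set L : Int := PySem.Chars.len rna with hLdef
  have hL0 : 0 ≤ L := by simp [hLdef, PySem.Chars.len]
  simp only [pvStop_eq]
  set p : Int → Bool := fun i => stops.contains (PySem.List.slice rna (some i) (some (i + 3))) with hp
  set paradas := (PySem.List.pyRange f (L - 2) 3).filter p with hparadas
  have hadv : paradas = pvAdv (f - 1) paradas := by
    rw [pvAdv_of_forall_lt]
    intro x hx
    have := pvMem_range3 (List.mem_of_mem_filter hx)
    omega
  rw [hadv, pvLoopB_eq rna L paradas (PySem.List.pyRange f (L-2) 3) (f-1)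
        (fun s hs => by have := pvMem_range3 hs; omega) (pvPairwise_range3 f (L-2))]
  apply List.map_congr_left
  intro inicio hmem
  have hmem' := List.mem_filter.1 hmem
  have hrng := pvMem_range3 hmem'.1
  have hi0 : 0 ≤ inicio := by omega
  have hiL : inicio < L - 2 := hrng.2.1
  -- left side: peel the first codon (no break at the start index)
  rw [pvJoin_nil_eq_flatten, pvRange3_cons inicio (L-2) hiL]
  simp only [pvScanA, bne_self_eq_false, Bool.and_false, Bool.false_eq_true, if_false, List.flatten_cons]
  rw [pvScan_eq rna stops L (L - 2 - (inicio+3)).toNat (inicio+3) inicio le_rfl (by omega) (by omega) (by omega)]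
  -- right side pointer: stops strictly after inicio
  rw [pvAdv_filter p (L-2) (L - 2 - f).toNat f inicio le_rfl (by omega) hrng.2.2]
  cases hfl : List.filter p (PySem.List.pyRange (inicio + 3) (L - 2) 3) with
  | cons s tl =>
    have hs : s ∈ PySem.List.pyRange (inicio+3) (L-2) 3 := by
      have : s ∈ List.filter p (PySem.List.pyRange (inicio+3) (L-2) 3) := by rw [hfl]; simp
      exact List.mem_of_mem_filter this
    have := pvMem_range3 hs
    rw [pvSlice_concat rna inicio (inicio+3) (s+3) hi0 (by omega) (by omega)]
  | nil =>
    rw [PySem.Int.floordiv_eq_ediv_of_pos (by norm_num), PySem.Int.floordiv_eq_ediv_of_pos (by norm_num)]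
    have harith : (inicio + 3) + 3 * ((L - (inicio+3)) / 3) = inicio + 3 * ((L - inicio) / 3) := by omega
    rw [harith]
    rw [pvSlice_concat rna inicio (inicio+3) (inicio + 3 * ((L - inicio) / 3)) hi0 (by omega) (by omega)]

-- ===== VERDICT (by name: the statement is the Claim_ definition above) =====
theorem orfs_spec : Claim_equal_orfs := by
  intro rna_secuencia codones_paro _
  unfold Spec_orfs orfs orfs_alt
  have h3 : PySem.List.pyRange 0 3 1 = [0, 1, 2] := by decide
  simp only [h3, List.foldl_cons, List.foldl_nil,
    PySem.List.foldl_append_if_eq_filter, PySem.List.foldl_append_singleton_eq_map,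
    List.nil_append]
  rw [pvFrame_eq rna_secuencia.toList (codones_paro.map String.toList) 0 (by norm_num),
      pvFrame_eq rna_secuencia.toList (codones_paro.map String.toList) 1 (by norm_num),
      pvFrame_eq rna_secuencia.toList (codones_paro.map String.toList) 2 (by norm_num)]
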